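-- pv_equiv track=rewrite | github.com/LeonidIvanov/checkio-solutions | elementary/three_words.py | is_three_words
-- ===== SOURCE A (Python) =====
-- def is_three_words(words):
--     """Let's teach the Robots to distinguish words and numbers.
--
--     You are given a string with words and numbers separated by whitespaces (one space). The words contains only letters.
--     You should check if the string contains three words in succession.
--     For example, the string "start 5 one two three 7 end" contains three words in succession.
--
--     Input: A string with words.
--
--     Output: The answer as a boolean.
--
--     Precondition: The input contains words and/or numbers. There are no mixed words (letters and digits combined).
--     0 < len(words) < 100
--     """
--     i = 0
--     for word in words.split():
--         if word.isalpha():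
--             i += 1
--         elif word.isdigit() and i < 3:
--             i = 0
--     if i >= 3:
--         return True
--     elif i < 3:
--         return False
--     else:
--         return False
-- ===== SOURCE B (Python) =====
-- def is_three_words(words):
--     flags = ''.join(
--         'W' if t.isalpha() else 'N' if t.isdigit() else ''
--         for t in words.split())
--     return 'WWW' in flags
-- ===== Notes on version B (the rewrite author's own statement) =====
-- stated objective: idiomatic
-- what changed: Replaces the stateful running counter with a transform-then-search decomposition: map each token to a flag character (W for alpha, N for digit, mixed tokens dropped) and search the flag string for a run of three word flags.
import Mathlib
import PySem

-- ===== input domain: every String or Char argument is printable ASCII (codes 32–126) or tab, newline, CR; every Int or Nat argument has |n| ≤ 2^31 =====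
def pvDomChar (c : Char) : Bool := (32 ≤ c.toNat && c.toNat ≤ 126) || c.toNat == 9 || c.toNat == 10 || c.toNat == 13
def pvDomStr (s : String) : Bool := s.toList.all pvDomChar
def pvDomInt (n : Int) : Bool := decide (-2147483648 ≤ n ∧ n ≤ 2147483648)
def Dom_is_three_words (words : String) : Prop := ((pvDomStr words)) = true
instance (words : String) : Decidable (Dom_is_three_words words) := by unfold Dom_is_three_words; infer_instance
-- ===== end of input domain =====

-- B replaces A's running counter with an idiomatic transform-then-search: map tokens to a 'W'/'N' flag string and test for "WWW".

-- ===== PORT A =====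
def is_three_words (words : String) : Bool :=
  let i : Int := (PySem.Str.split₀ words).foldl
    (fun i word =>
      if PySem.Str.strIsalpha word then i + 1
      else if PySem.Str.strIsdigit word && decide (i < 3) then 0 else i) 0
  if 3 ≤ i then true else if i < 3 then false else false

-- ===== PORT B =====
def is_three_words_alt (words : String) : Bool :=
  let flags : String := PySem.Str.join "" ((PySem.Str.split₀ words).map
    (fun t => if PySem.Str.strIsalpha t then "W" else if PySem.Str.strIsdigit t then "N" else ""))
  PySem.Str.isIn "WWW" flags

-- ===== PRECONDITION & SPEC =====
def Spec_is_three_words (words : String) (out : Bool) : Prop := out = is_three_words_alt words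
instance (words : String) (out : Bool) : Decidable (Spec_is_three_words words out) := by unfold Spec_is_three_words; infer_instance

-- ===== CLAIM (what is proved, stated in full; the proofs are below) =====
def Claim_equal_is_three_words : Prop := ∀ (words : String), Dom_is_three_words words → Spec_is_three_words words (is_three_words words)

-- ===== LEMMAS AND PROOFS =====

-- A's per-token counter step, lifted to single flag characters
def pvStepC (i : Int) (c : Char) : Int :=
  if c = 'W' then i + 1 else if i < 3 then 0 else i

-- a token's flag characters (empty for mixed tokens)
def pvFlag (t : String) : List Char :=
  if PySem.Str.strIsalpha t then ['W'] else if PySem.Str.strIsdigit t then ['N'] else []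

theorem pvJoin_nil_flatten (xss : List (List Char)) : PySem.Chars.join [] xss = xss.flatten := by
  show List.intercalate [] xss = xss.flatten
  induction xss with
  | nil => rfl
  | cons x xs ih =>
    cases xs with
    | nil => simp [List.intercalate]
    | cons y ys =>
      simp only [List.intercalate, List.intersperse] at *
      simpa using ih

theorem pvTokChar (ts : List String) (i : Int) :
    ts.foldl (fun i word =>
      if PySem.Str.strIsalpha word then i + 1
      else if PySem.Str.strIsdigit word && decide (i < 3) then 0 else i) i
    = ((ts.map pvFlag).flatten).foldl pvStepC i := by
  induction ts generalizing i with
  | nil => rfl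
  | cons t ts ih =>
    simp only [List.foldl_cons, List.map_cons, List.flatten_cons, List.foldl_append]
    rw [ih]
    congr 1
    by_cases ha : PySem.Chars.strIsalpha t.toList
    · simp [pvFlag, pvStepC, ha]
    · by_cases hd : PySem.Chars.strIsdigit t.toList
      · by_cases h3 : i < 3 <;> simp [pvFlag, pvStepC, ha, hd, h3]
      · simp [pvFlag, ha, hd]

theorem pvLocked (fs : List Char) (i : Int) (h : 3 ≤ i) : 3 ≤ fs.foldl pvStepC i := by
  induction fs generalizing i with
  | nil => exact h
  | cons c fs ih =>
    simp only [List.foldl_cons]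
    by_cases hc : c = 'W'
    · rw [show pvStepC i c = i + 1 from by simp [pvStepC, hc]]
      exact ih (i + 1) (by omega)
    · have hs : pvStepC i c = i := by
        simp only [pvStepC, if_neg hc]
        rw [if_neg (by omega)]
      rw [hs]
      exact ih i h

theorem pvWWW_replicate (n : Nat) : (['W','W','W'] <:+: List.replicate n 'W') ↔ 3 ≤ n := by
  constructor
  · intro h
    have := h.sublist.length_le
    simpa using this
  · intro h
    refine ⟨[], List.replicate (n - 3) 'W', ?_⟩
    have : List.replicate 3 'W' ++ List.replicate (n - 3) 'W' = List.replicate n 'W' := by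
      rw [← List.replicate_add]; congr 1; omega
    simpa using this

theorem pvStraddle (c : Char) (fs : List Char) (n : Nat) (hc : c ≠ 'W') (hn : n < 3) :
    (['W','W','W'] <:+: List.replicate n 'W' ++ c :: fs) ↔ ['W','W','W'] <:+: fs := by
  interval_cases n <;>
    simp [List.infix_cons_iff, List.cons_prefix_cons, Ne.symm hc]

theorem pvKey (fs : List Char) (n : Nat) :
    (3 ≤ fs.foldl pvStepC (n : Int)) ↔ ['W','W','W'] <:+: (List.replicate n 'W' ++ fs) := by
  induction fs generalizing n with
  | nil =>
    simp only [List.foldl_nil, List.append_nil, pvWWW_replicate]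
    exact_mod_cast Iff.rfl
  | cons c fs ih =>
    simp only [List.foldl_cons]
    by_cases hc : c = 'W'
    · subst hc
      have h1 : pvStepC (n : Int) 'W' = ((n + 1 : Nat) : Int) := by
        simp [pvStepC]
      rw [h1, ih (n + 1)]
      have h2 : List.replicate (n + 1) 'W' ++ fs = List.replicate n 'W' ++ 'W' :: fs := by
        rw [List.replicate_succ']; simp
      rw [h2]
    · have hstep : pvStepC (n : Int) c = if (n : Int) < 3 then 0 else (n : Int) := by
        simp [pvStepC, hc]
      rw [hstep]
      by_cases h3 : 3 ≤ n
      · rw [if_neg (by exact_mod_cast not_lt.mpr h3)]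
        constructor
        · intro _
          exact ((pvWWW_replicate n).mpr h3).trans
            ((List.prefix_append _ _).isInfix)
        · intro _
          exact pvLocked fs _ (by exact_mod_cast h3)
      · rw [if_pos (by exact_mod_cast not_le.mp h3)]
        have h0 : (0 : Int) = ((0 : Nat) : Int) := rfl
        rw [h0, ih 0, pvStraddle c fs n hc (by omega)]
        simp

-- ===== VERDICT (by name: the statement is the Claim_ definition above) =====
theorem is_three_words_spec : Claim_equal_is_three_words := by
  intro words _
  unfold Spec_is_three_words is_three_words is_three_words_alt
  set ts := PySem.Str.split₀ words with hts
  rw [pvTokChar]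
  have hflags : (PySem.Str.join "" (ts.map
      (fun t => if PySem.Str.strIsalpha t then "W" else if PySem.Str.strIsdigit t then "N" else ""))).toList
      = (ts.map pvFlag).flatten := by
    rw [PySem.Str.toList_join]
    have : ("" : String).toList = ([] : List Char) := rfl
    rw [this, pvJoin_nil_flatten, List.map_map]
    congr 1
    refine List.map_congr_left ?_
    intro t _
    by_cases ha : PySem.Chars.strIsalpha t.toList <;>
      by_cases hd : PySem.Chars.strIsdigit t.toList <;>
        simp [Function.comp, pvFlag, ha, hd]
  have hkey := pvKey ((ts.map pvFlag).flatten) 0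
  simp only [Nat.cast_zero, List.replicate_zero, List.nil_append] at hkey
  by_cases h : 3 ≤ ((ts.map pvFlag).flatten).foldl pvStepC (0 : Int)
  · rw [if_pos h]
    have hinf := hkey.mp h
    have : PySem.Str.isIn "WWW" (PySem.Str.join "" (ts.map
        (fun t => if PySem.Str.strIsalpha t then "W" else if PySem.Str.strIsdigit t then "N" else ""))) = true := by
      rw [PySem.Str.isIn_iff_infix, hflags]
      exact hinf
    rw [this]
  · rw [if_neg h, if_pos (by omega)]
    have : PySem.Str.isIn "WWW" (PySem.Str.join "" (ts.map
        (fun t => if PySem.Str.strIsalpha t then "W" else if PySem.Str.strIsdigit t then "N" else ""))) = false := by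
      rw [Bool.eq_false_iff]
      intro hcon
      rw [PySem.Str.isIn_iff_infix, hflags] at hcon
      exact h (hkey.mpr hcon)
    rw [this]
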